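-- pv_equiv track=rewrite | github.com/cnotley/hackathon | openpyxl/minimal.py | _coord
-- ===== SOURCE A (Python) =====
-- def _coord(key):
--     col = 0
--     row = ""
--     for ch in key:
--         if ch.isalpha():
--             col = col * 26 + (ord(ch.upper()) - 64)
--         elif ch.isdigit():
--             row += ch
--     return int(row or 1), col
-- ===== SOURCE B (Python) =====
-- def _coord(key):
--     digits = "".join(ch for ch in key if ch.isdigit())
--     col, p = 0, 1
--     for ch in reversed(key):
--         if ch.isalpha():
--             col += (ord(ch.upper()) - 64) * p
--             p *= 26
--     return int(digits or "1"), col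
-- ===== Notes on version B (the rewrite author's own statement) =====
-- stated objective: alternative
-- what changed: Splits A's single stateful loop into two independent pieces: the row digits are collected by a filtered join, and the column is computed by traversing the key back-to-front with a running power-of-26 accumulator (positional weights) instead of A's forward Horner accumulation.
import Mathlib
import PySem

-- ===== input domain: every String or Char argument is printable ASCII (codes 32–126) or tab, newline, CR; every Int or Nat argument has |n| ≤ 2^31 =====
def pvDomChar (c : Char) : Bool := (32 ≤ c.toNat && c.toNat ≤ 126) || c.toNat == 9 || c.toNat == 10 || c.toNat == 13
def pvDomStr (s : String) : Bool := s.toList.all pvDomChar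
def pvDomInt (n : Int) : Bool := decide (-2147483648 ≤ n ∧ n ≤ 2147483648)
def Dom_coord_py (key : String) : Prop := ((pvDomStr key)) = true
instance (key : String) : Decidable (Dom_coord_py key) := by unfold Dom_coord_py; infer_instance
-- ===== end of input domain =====

-- B splits A's single stateful loop: digits are collected by a filtered join, and the column is
-- computed back-to-front with a running power-of-26 accumulator instead of A's forward Horner
-- loop; return values are identical (objective: alternative).

-- ord(ch.upper()) - 64, shared letter-value helper of both ports
def pvConv (ch : Char) : Int := ((PySem.Chars.upperChar ch).toNat : Int) - 64

-- ===== PORT A =====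
-- A's loop body: col, row updated per character, in A's branch order
def coordLoopA : List Char → Int → List Char → Int × List Char
  | [], col, row => (col, row)
  | ch :: rest, col, row =>
    if PySem.Chars.isalpha ch then
      coordLoopA rest (col * 26 + pvConv ch) row
    else if PySem.Chars.isdigit ch then
      coordLoopA rest col (row ++ [ch])
    else
      coordLoopA rest col row

def coord_py (key : String) : Int × Int :=
  let r := coordLoopA key.toList 0 []
  -- int(row or 1): empty row means int(1)=1; else int(row) — row is nonempty ASCII digits,
  -- so ofChars? is always some and the .getD 0 default is unreachable
  ((if r.2 = [] then (1 : Int) else (PySem.Int.ofChars? r.2).getD 0), r.1)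

-- ===== PORT B =====
-- B's column loop over reversed(key): col += value * p; p *= 26 on letters
def coordLoopB : List Char → Int → Int → Int × Int
  | [], col, p => (col, p)
  | ch :: rest, col, p =>
    if PySem.Chars.isalpha ch then
      coordLoopB rest (col + pvConv ch * p) (p * 26)
    else
      coordLoopB rest col p

def coord_py_alt (key : String) : Int × Int :=
  let digits := key.toList.filter PySem.Chars.isdigit
  let col := (coordLoopB key.toList.reverse 0 1).1
  ((PySem.Int.ofChars? (if digits.isEmpty then ['1'] else digits)).getD 0, col)

-- ===== PRECONDITION & SPEC =====
def Spec_coord_py (key : String) (out : Int × Int) : Prop := out = coord_py_alt key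
instance (key : String) (out : Int × Int) : Decidable (Spec_coord_py key out) := by unfold Spec_coord_py; infer_instance

-- ===== CLAIM (what is proved, stated in full; the proofs are below) =====
def Claim_equal_coord_py : Prop := ∀ (key : String), Dom_coord_py key → Spec_coord_py key (coord_py key)

-- ===== LEMMAS AND PROOFS =====

-- PySem's alpha and digit predicates are disjoint
theorem pv_alpha_not_digit (c : Char) (h : PySem.Chars.isalpha c = true) :
    PySem.Chars.isdigit c = false := by
  simp only [PySem.Chars.isalpha, PySem.Chars.isupper, PySem.Chars.islower, PySem.Chars.isdigit,
    Bool.or_eq_true, Bool.and_eq_true, decide_eq_true_eq, Bool.and_eq_false_iff,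
    decide_eq_false_iff_not] at *
  rcases h with ⟨h1, _⟩ | ⟨h1, _⟩ <;>
    exact Or.inr (fun hc => absurd (le_trans h1 hc) (by decide))

def pvStep (c : Int) (v : Int) : Int := c * 26 + v

-- A's loop = Horner fold over the letter values, paired with the digit filter
theorem pv_loopA_eq (l : List Char) : ∀ (col : Int) (row : List Char),
    coordLoopA l col row =
      (((l.filter PySem.Chars.isalpha).map pvConv).foldl pvStep col,
       row ++ l.filter PySem.Chars.isdigit) := by
  induction l with
  | nil => intro col row; simp [coordLoopA]
  | cons ch rest ih =>
    intro col row
    by_cases ha : PySem.Chars.isalpha ch = true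
    · simp [coordLoopA, ha, pv_alpha_not_digit ch ha, ih, pvStep]
    · by_cases hd : PySem.Chars.isdigit ch = true
      · simp [coordLoopA, ha, hd, ih]
      · simp [coordLoopA, ha, hd, ih]

-- B's loop in closed form: accumulator plus p times a low-to-high positional foldr
theorem pv_loopB_eq (l : List Char) : ∀ (col p : Int),
    coordLoopB l col p =
      (col + p * ((l.filter PySem.Chars.isalpha).map pvConv).foldr (fun v acc => v + 26 * acc) 0,
       p * 26 ^ (l.filter PySem.Chars.isalpha).length) := by
  induction l with
  | nil => intro col p; simp [coordLoopB]
  | cons ch rest ih =>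
    intro col p
    by_cases ha : PySem.Chars.isalpha ch = true
    · simp only [coordLoopB, ha, if_pos, ih, List.filter_cons_of_pos, List.map_cons,
        List.foldr_cons, List.length_cons]
      simp only [Prod.mk.injEq]
      exact ⟨by ring, by ring⟩
    · simp [coordLoopB, ha, ih]

-- the two column computations agree
theorem pv_col_eq (l : List Char) :
    (coordLoopB l.reverse 0 1).1 = ((l.filter PySem.Chars.isalpha).map pvConv).foldl pvStep 0 := by
  rw [pv_loopB_eq]
  simp only [List.filter_reverse, List.map_reverse, List.foldr_reverse]
  have : (fun (acc v : Int) => v + 26 * acc) = pvStep := by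
    funext a v; simp [pvStep]; ring
  simp [this]

-- ===== VERDICT (by name: the statement is the Claim_ definition above) =====
theorem coord_py_spec : Claim_equal_coord_py := by
  intro key _
  unfold Spec_coord_py coord_py coord_py_alt
  simp only [pv_loopA_eq, pv_col_eq, List.nil_append]
  by_cases h : key.toList.filter PySem.Chars.isdigit = []
  · simp [h]; decide
  · simp [h, List.isEmpty_iff]
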